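-- pv_equiv track=rewrite | github.com/UnWaDo/OGEN | scripts/xml_unifier.py | compound_code
-- ===== SOURCE A (Python) =====
-- from typing import List
--
-- CODES = {
--     'H': 1,
--     'C': 3,
--     'N': 5,
--     'O': 7,
--     'F': 11,
--     'S': 13,
--     'CL': 17,
--     'BR': 23,
--     'I': 29
-- }
--
-- def compound_code(elements: List[str]):
--     code = 0
--     found = {}
--     for i, e in enumerate(elements):
--         if found.get(e) is None:
--             found[e] = 2
--             code += CODES[e.upper()] * (i + 1)
--         else:
--             code += CODES[e.upper()] * found[e] * (i + 1)
--             found[e] += 1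
--     code += 31 * len(elements)
--     out = ''
--     for i in range(3):
--         out += chr(ord('A') + (code % 26))
--         code //= 26
--     return out
-- ===== SOURCE B (Python) =====
-- from typing import List
--
-- CODES = {
--     'H': 1,
--     'C': 3,
--     'N': 5,
--     'O': 7,
--     'F': 11,
--     'S': 13,
--     'CL': 17,
--     'BR': 23,
--     'I': 29
-- }
--
-- def compound_code(elements: List[str]):
--     # Group pass 1: map each distinct element to its 1-based positions, in order.
--     positions = {}
--     for i, e in enumerate(elements):
--         positions.setdefault(e, []).append(i + 1)
--     # Pass 2: per group, the k-th occurrence contributes CODES[e.upper()] * position * k.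
--     code = 31 * len(elements)
--     for e, ps in positions.items():
--         c = CODES[e.upper()]
--         for rank, p in enumerate(ps, 1):
--             code += c * p * rank
--     # Base-26 conversion into three letters.
--     letters = []
--     for _ in range(3):
--         code, r = divmod(code, 26)
--         letters.append(chr(ord('A') + r))
--     return ''.join(letters)
-- ===== Notes on version B (the rewrite author's own statement) =====
-- stated objective: alternative
-- what changed: B replaces A's position-sequential loop with a per-element occurrence counter dict by a grouped two-pass scheme: first build a dict mapping each distinct element to its 1-based positions, then sum CODES[e.upper()] * position * rank per group, and convert to letters with divmod instead of A's mod/floordiv pair.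
import Mathlib
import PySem

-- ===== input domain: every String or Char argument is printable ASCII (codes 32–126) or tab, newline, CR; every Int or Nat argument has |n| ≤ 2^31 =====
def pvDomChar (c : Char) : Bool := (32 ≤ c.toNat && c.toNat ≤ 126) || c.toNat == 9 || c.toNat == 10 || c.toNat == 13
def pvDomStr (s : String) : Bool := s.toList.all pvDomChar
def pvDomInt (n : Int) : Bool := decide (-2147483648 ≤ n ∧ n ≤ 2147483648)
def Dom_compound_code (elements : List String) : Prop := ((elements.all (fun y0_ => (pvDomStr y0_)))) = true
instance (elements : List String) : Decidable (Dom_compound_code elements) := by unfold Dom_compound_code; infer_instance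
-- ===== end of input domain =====

-- B groups the elements into a positions dict first and sums per group (rank × position), instead of
-- A's position-sequential loop with a per-element counter; same return value, a different decomposition.

-- ===== PORT A =====
def pvCodes : PySem.Dict String Int :=
  PySem.Dict.ofList [("H",1),("C",3),("N",5),("O",7),("F",11),("S",13),("CL",17),("BR",23),("I",29)]

-- CODES[e.upper()]; Python raises KeyError when the key is absent — exactly those inputs are excluded by Pre_
def pvCodeOf (e : String) : Int := (pvCodes.get? (PySem.Str.upper e)).getD 0

def pvAStep (st : Int × PySem.Dict String Int) (p : Int × String) : Int × PySem.Dict String Int :=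
  match st.2.get? p.2 with
  | none => (st.1 + pvCodeOf p.2 * (p.1 + 1), st.2.insert p.2 2)
  | some f => (st.1 + pvCodeOf p.2 * f * (p.1 + 1), st.2.insert p.2 (f + 1))

def compound_code (elements : List String) : String :=
  let st := (PySem.List.enumerate elements).foldl pvAStep (0, PySem.Dict.empty)
  let code := st.1 + 31 * (elements.length : Int)
  -- out += chr(ord('A') + code % 26); code //= 26, three times
  let fin := (PySem.List.pyRange 0 3 1).foldl
    (fun (acc : List Char × Int) _ =>
      (acc.1 ++ [Char.ofNat (65 + (PySem.Int.mod acc.2 26).toNat)], PySem.Int.floordiv acc.2 26))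
    ([], code)
  String.ofList fin.1

-- ===== PORT B =====
-- positions.setdefault(e, []).append(i + 1)
def pvBStep (d : PySem.Dict String (List Int)) (p : Int × String) : PySem.Dict String (List Int) :=
  d.modify p.2 [] (· ++ [p.1 + 1])

def compound_code_alt (elements : List String) : String :=
  let positions := (PySem.List.enumerate elements).foldl pvBStep PySem.Dict.empty
  let code := positions.items.foldl
    (fun acc pr => (PySem.List.enumerate pr.2 1).foldl
        (fun s q => s + pvCodeOf pr.1 * q.2 * q.1) acc)
    (31 * (elements.length : Int))
  -- code, r = divmod(code, 26); letters.append(chr(ord('A') + r)), three times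
  let fin := (PySem.List.pyRange 0 3 1).foldl
    (fun (acc : Int × List Char) _ =>
      (PySem.Int.floordiv acc.1 26, acc.2 ++ [Char.ofNat (65 + (PySem.Int.mod acc.1 26).toNat)]))
    (code, [])
  String.ofList fin.2

-- ===== PRECONDITION & SPEC =====
-- Pre_ excludes exactly the inputs on which A raises KeyError: an element whose upper-case form is not a CODES key.
def Pre_compound_code (elements : List String) : Prop :=
  ∀ e ∈ elements, PySem.Str.upper e ∈ (["H","C","N","O","F","S","CL","BR","I"] : List String)
instance (elements : List String) : Decidable (Pre_compound_code elements) := by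
  unfold Pre_compound_code; infer_instance
def pvWitness_compound_code : List String := ["C", "h", "C", "O"]
def Spec_compound_code (elements : List String) (out : String) : Prop := out = compound_code_alt elements
instance (elements : List String) (out : String) : Decidable (Spec_compound_code elements out) := by
  unfold Spec_compound_code; infer_instance

-- ===== CLAIM (what is proved, stated in full; the proofs are below) =====
def Claim_equal_compound_code : Prop := ∀ (elements : List String), Dom_compound_code elements → Pre_compound_code elements → Spec_compound_code elements (compound_code elements)

-- ===== LEMMAS AND PROOFS =====

-- contribution of one group (e, ps): Σ_k CODES[e.upper()] * ps[k] * (k+1)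
def pvTerm (pr : String × List Int) : Int :=
  ((PySem.List.enumerate pr.2 1).map (fun q => pvCodeOf pr.1 * q.2 * q.1)).sum

theorem pvTerm_append (x : String) (ps : List Int) (p : Int) :
    pvTerm (x, ps ++ [p]) = pvTerm (x, ps) + pvCodeOf x * p * ((ps.length : Int) + 1) := by
  unfold pvTerm
  rw [PySem.List.enumerate_append, List.map_append, List.sum_append]
  simp only [PySem.List.enumerate, List.map, List.sum_cons, List.sum_nil]
  ring

theorem pvSum_replace {L : List (String × List Int)} {x : String} {old : List Int}
    (h : (L.map Prod.fst).Nodup) (hm : (x, old) ∈ L) (v : List Int) :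
    ((L.map (fun p => if p.1 == x then (x, v) else p)).map pvTerm).sum
      = (L.map pvTerm).sum - pvTerm (x, old) + pvTerm (x, v) := by
  induction L with
  | nil => simp at hm
  | cons p t ih =>
    rw [List.map_cons, List.map_cons, List.sum_cons, List.map_cons, List.sum_cons]
    rw [List.map_cons, List.nodup_cons] at h
    by_cases hp : p.1 = x
    · have hxt : x ∉ t.map Prod.fst := by rw [← hp]; exact h.1
      have hpe : p = (x, old) := by
        rcases List.mem_cons.mp hm with h1 | h2
        · exact h1.symm
        · exact absurd (List.mem_map.mpr ⟨(x, old), h2, rfl⟩) hxt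
      have ht : t.map (fun p => if p.1 == x then (x, v) else p) = t := by
        have h2 : t.map (fun p => if p.1 == x then (x, v) else p) = t.map id := by
          apply List.map_congr_left
          intro q hq
          have hq1 : q.1 ≠ x := fun hx => hxt (List.mem_map.mpr ⟨q, hq, hx⟩)
          simp [hq1]
        rw [h2, List.map_id]
      rw [if_pos (by simp [hp]), ht, hpe]
      ring
    · have hm' : (x, old) ∈ t := by
        rcases List.mem_cons.mp hm with h1 | h2
        · exact absurd (congrArg Prod.fst h1.symm) hp
        · exact h2
      rw [if_neg (by simp [hp]), ih h.2 hm']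
      ring

theorem pvInv (l : List String) :
    (((PySem.List.enumerate l).foldl pvAStep (0, PySem.Dict.empty)).1
      = ((((PySem.List.enumerate l).foldl pvBStep PySem.Dict.empty).items.map pvTerm).sum))
  ∧ (∀ e, ((PySem.List.enumerate l).foldl pvAStep (0, PySem.Dict.empty)).2.get? e
      = if l.count e = 0 then none else some ((l.count e : Int) + 1))
  ∧ (∀ e, (((PySem.List.enumerate l).foldl pvBStep PySem.Dict.empty).getD e []).length = l.count e)
  ∧ (∀ e, ((PySem.List.enumerate l).foldl pvBStep PySem.Dict.empty).contains e = decide (0 < l.count e))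
  ∧ ((PySem.List.enumerate l).foldl pvBStep PySem.Dict.empty).keys.Nodup := by
  induction l using List.reverseRecOn with
  | nil =>
    refine ⟨?_, ?_, ?_, ?_, ?_⟩
    · simp [PySem.List.enumerate, PySem.Dict.empty]
    · intro e; simp [PySem.List.enumerate, PySem.Dict.get?_empty]
    · intro e; simp [PySem.List.enumerate, PySem.Dict.getD_empty]
    · intro e; simp [PySem.List.enumerate, PySem.Dict.contains_empty]
    · simp only [PySem.List.enumerate, List.foldl_nil]; exact PySem.Dict.nodup_keys_empty
  | append_singleton l x ih =>
    obtain ⟨ih1, ih2, ih3, ih4, ih5⟩ := ih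
    have hrw : ∀ {β : Type} (f : β → Int × String → β) (init : β),
        (PySem.List.enumerate (l ++ [x])).foldl f init
          = f ((PySem.List.enumerate l).foldl f init) ((l.length : Int), x) := by
      intro β f init
      rw [PySem.List.enumerate_append, List.foldl_append]
      simp [PySem.List.enumerate]
    have hmod : pvBStep ((PySem.List.enumerate l).foldl pvBStep PySem.Dict.empty) ((l.length : Int), x)
        = ((PySem.List.enumerate l).foldl pvBStep PySem.Dict.empty).insert x
            (((PySem.List.enumerate l).foldl pvBStep PySem.Dict.empty).getD x [] ++ [(l.length : Int) + 1]) := rfl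
    refine ⟨?_, ?_, ?_, ?_, ?_⟩
    · rw [hrw, hrw, hmod]
      by_cases hc : l.count x = 0
      · have hcont : ((PySem.List.enumerate l).foldl pvBStep PySem.Dict.empty).contains x = false := by
          rw [ih4 x, hc]; simp
        rw [PySem.Dict.items_insert_of_not_contains _ _ hcont,
            PySem.Dict.getD_of_not_contains _ _ hcont]
        rw [List.map_append, List.sum_append]
        have hget : (((PySem.List.enumerate l).foldl pvAStep (0, PySem.Dict.empty)).2).get? x = none := by
          rw [ih2 x, hc]; simp
        simp only [pvAStep, hget]
        rw [← ih1]
        simp [pvTerm, PySem.List.enumerate]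
      · have hcont : ((PySem.List.enumerate l).foldl pvBStep PySem.Dict.empty).contains x = true := by
          rw [ih4 x]; simp [Nat.pos_of_ne_zero hc]
        obtain ⟨old, hold⟩ : ∃ old, ((PySem.List.enumerate l).foldl pvBStep PySem.Dict.empty).get? x = some old := by
          have := PySem.Dict.contains_eq_isSome_get? ((PySem.List.enumerate l).foldl pvBStep PySem.Dict.empty) x
          rw [hcont] at this
          exact Option.isSome_iff_exists.mp this.symm
        have hgetD : ((PySem.List.enumerate l).foldl pvBStep PySem.Dict.empty).getD x [] = old :=
          PySem.Dict.getD_of_get?_eq_some _ _ hold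
        have hlen : (old.length : Int) = (l.count x : Int) := by
          rw [← hgetD]; exact_mod_cast congrArg Nat.cast (ih3 x)
        rw [PySem.Dict.items_insert_of_contains _ _ hcont, hgetD]
        rw [pvSum_replace ih5 (PySem.Dict.mem_items_of_get?_eq_some _ hold) (old ++ [(l.length : Int) + 1])]
        rw [pvTerm_append]
        have hget : (((PySem.List.enumerate l).foldl pvAStep (0, PySem.Dict.empty)).2).get? x
            = some ((l.count x : Int) + 1) := by
          rw [ih2 x]; simp [hc]
        simp only [pvAStep, hget]
        rw [← ih1, hlen]
        ring
    · intro e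
      rw [hrw]
      have hc2 : (l ++ [x]).count e = l.count e + if e = x then 1 else 0 := by
        by_cases he : e = x
        · simp [List.count_append, he]
        · simp [List.count_append, he, Ne.symm he]
      by_cases he : e = x
      · subst he
        by_cases hc : l.count e = 0
        · have hget : (((PySem.List.enumerate l).foldl pvAStep (0, PySem.Dict.empty)).2).get? e = none := by
            rw [ih2 e, hc]; simp
          simp only [pvAStep, hget]
          rw [PySem.Dict.get?_insert, if_pos rfl, hc2, hc]
          simp
        · have hget : (((PySem.List.enumerate l).foldl pvAStep (0, PySem.Dict.empty)).2).get? e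
              = some ((l.count e : Int) + 1) := by
            rw [ih2 e]; simp [hc]
          simp only [pvAStep, hget]
          rw [PySem.Dict.get?_insert, if_pos rfl, hc2]
          simp
      · have hstep : ∀ v, ((((PySem.List.enumerate l).foldl pvAStep (0, PySem.Dict.empty)).2).insert x v).get? e
            = (((PySem.List.enumerate l).foldl pvAStep (0, PySem.Dict.empty)).2).get? e := by
          intro v; rw [PySem.Dict.get?_insert, if_neg he]
        cases hget : (((PySem.List.enumerate l).foldl pvAStep (0, PySem.Dict.empty)).2).get? x with
        | none => simp only [pvAStep, hget, hstep, ih2 e, hc2, he]; simp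
        | some f => simp only [pvAStep, hget, hstep, ih2 e, hc2, he]; simp
    · intro e
      rw [hrw]
      have := PySem.Dict.getD_modify ((PySem.List.enumerate l).foldl pvBStep PySem.Dict.empty)
        x e [] (· ++ [(l.length : Int) + 1])
      simp only [pvBStep]
      rw [this]
      by_cases he : e = x
      · subst he
        simp [ih3 e, List.count_append]
      · rw [if_neg he, ih3 e]
        simp [List.count_append, Ne.symm he]
    · intro e
      rw [hrw, hmod, PySem.Dict.contains_insert, ih4 e]
      by_cases he : e = x
      · subst he; simp [List.count_append]
      · have hne : (e == x) = false := by simp [he]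
        have hcnt : (l ++ [x]).count e = l.count e := by
          simp [List.count_append, Ne.symm he]

        rw [hne, hcnt]
        simp
    · rw [hrw, hmod]
      exact PySem.Dict.nodup_keys_insert _ _ _ ih5

theorem pvCode_eq (l : List String) :
    ((PySem.List.enumerate l).foldl pvAStep (0, PySem.Dict.empty)).1 + 31 * (l.length : Int)
      = ((PySem.List.enumerate l).foldl pvBStep PySem.Dict.empty).items.foldl
          (fun acc pr => (PySem.List.enumerate pr.2 1).foldl
            (fun s q => s + pvCodeOf pr.1 * q.2 * q.1) acc)
          (31 * (l.length : Int)) := by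
  rw [PySem.List.foldl_congr_mem _
        (fun acc pr => (PySem.List.enumerate pr.2 1).foldl
          (fun s q => s + pvCodeOf pr.1 * q.2 * q.1) acc)
        (fun acc pr => acc + pvTerm pr) _
        (fun acc pr _ => PySem.List.foldl_add (PySem.List.enumerate pr.2 1)
          (fun q => pvCodeOf pr.1 * q.2 * q.1) acc),
      PySem.List.foldl_add, (pvInv l).1]
  ring

theorem pvConv_eq (c : Int) :
    String.ofList (((PySem.List.pyRange 0 3 1).foldl
      (fun (acc : List Char × Int) _ =>
        (acc.1 ++ [Char.ofNat (65 + (PySem.Int.mod acc.2 26).toNat)], PySem.Int.floordiv acc.2 26))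
      ([], c)).1)
    = String.ofList (((PySem.List.pyRange 0 3 1).foldl
      (fun (acc : Int × List Char) _ =>
        (PySem.Int.floordiv acc.1 26, acc.2 ++ [Char.ofNat (65 + (PySem.Int.mod acc.1 26).toNat)]))
      (c, [])).2) := by
  rfl

-- ===== VERDICT (by name: the statement is the Claim_ definition above) =====
theorem compound_code_spec : Claim_equal_compound_code := by
  unfold Claim_equal_compound_code
  intro elements _ _
  unfold Spec_compound_code
  simp only [compound_code, compound_code_alt]
  rw [← pvCode_eq elements]
  exact pvConv_eq _
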